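-- pv_equiv track=rewrite | github.com/slimbootloader/slimbootloader | Platform/QemuBoardPkg/Script/TestCases/firmware_update.py | check_fwu_result
-- ===== SOURCE A (Python) =====
-- def  get_check_lines (bp = 0, mode = 0):
--     lines = [
--               "===== Intel Slim Bootloader STAGE1A =====",
--               "===== Intel Slim Bootloader STAGE1B =====",
--               "BOOT: BP%d" % bp,
--               "MODE: %d" % mode,
--               "===== Intel Slim Bootloader STAGE2 ======",
--               "Jump to payload"
--             ]
--     if mode == 0x12:
--         bp_ab = 'AB' if bp == 0 else 'BA'
--         lines.extend ([
--               "===========Read Capsule Image============",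
--               "Boot from partition %s, update partition %s" % (bp_ab[0], bp_ab[1]),
--               "Finished   100%",
--               "Reset required to proceed"
--               ])
--     return lines
--
-- def check_fwu_result (output):
--     ret   = 0
--     index = 0
--     cycle = 1
--     count = len(output)
--     for bp, mode in [(0, 0x12), (1, 0x12), (0, 0)]:
--         for line in get_check_lines (bp, mode):
--             found = False
--             while not found and index < count:
--                 if line in output[index]:
--                     found = True
--                     break
--                 else:
--                     index += 1
--             if found:
--                 index += 1
--                 continue
--             else:
--                 print ("Failed locating '%s' in cycle %d !" % (line, cycle))
--                 ret = -1
--                 break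
--         if ret < 0:
--             break
--         cycle += 1
--
--     return  ret
-- ===== SOURCE B (Python) =====
-- def get_check_lines (bp = 0, mode = 0):
--     lines = [
--               "===== Intel Slim Bootloader STAGE1A =====",
--               "===== Intel Slim Bootloader STAGE1B =====",
--               "BOOT: BP%d" % bp,
--               "MODE: %d" % mode,
--               "===== Intel Slim Bootloader STAGE2 ======",
--               "Jump to payload"
--             ]
--     if mode == 0x12:
--         bp_ab = 'AB' if bp == 0 else 'BA'
--         lines.extend ([
--               "===========Read Capsule Image============",
--               "Boot from partition %s, update partition %s" % (bp_ab[0], bp_ab[1]),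
--               "Finished   100%",
--               "Reset required to proceed"
--               ])
--     return lines
--
-- def check_fwu_result (output):
--     # Stage 1: flatten the three cycles into one expected (line, cycle) table.
--     expected = [(line, cyc)
--                 for cyc, (bp, mode) in enumerate([(0, 0x12), (1, 0x12), (0, 0)], 1)
--                 for line in get_check_lines(bp, mode)]
--     # Stage 2: build an inverted index: each distinct expected line -> the sorted
--     # list of positions of output lines containing it (computed once per line).
--     occ = {}
--     for line, _ in expected:
--         if line not in occ:
--             occ[line] = [i for i, o in enumerate(output) if line in o]
--     # Stage 3: greedy sequential match using only the occurrence lists.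
--     cur = 0
--     for line, cycle in expected:
--         nxt = next((i for i in occ[line] if i >= cur), None)
--         if nxt is None:
--             print ("Failed locating '%s' in cycle %d !" % (line, cycle))
--             return -1
--         cur = nxt + 1
--     return 0
-- ===== Notes on version B (the rewrite author's own statement) =====
-- stated objective: alternative
-- what changed: B is staged instead of A's one nested state machine: it first flattens the three cycles into an expected (line, cycle) table, then builds an inverted index mapping each distinct expected line to its list of occurrence positions in output, and finally matches by picking from each line's occurrence list the first position not yet consumed, so A's inner while-scan over output (with index/found/ret/break state) disappears.
import Mathlib
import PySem

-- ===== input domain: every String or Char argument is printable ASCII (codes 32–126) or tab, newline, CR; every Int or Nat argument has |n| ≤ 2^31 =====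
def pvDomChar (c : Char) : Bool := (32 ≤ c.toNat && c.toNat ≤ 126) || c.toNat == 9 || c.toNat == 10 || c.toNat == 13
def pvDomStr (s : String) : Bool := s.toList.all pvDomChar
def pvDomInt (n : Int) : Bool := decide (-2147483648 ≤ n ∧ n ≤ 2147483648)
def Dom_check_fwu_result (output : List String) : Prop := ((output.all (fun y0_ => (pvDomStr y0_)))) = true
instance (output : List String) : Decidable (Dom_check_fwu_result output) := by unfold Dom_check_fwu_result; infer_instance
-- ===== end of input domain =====

-- B replaces A's nested index/found/ret/break state machine by three stages: flatten the cycles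
-- into an expected table, build an inverted index line -> occurrence positions, then match from
-- the occurrence lists (objective: alternative). Equivalence is about the RETURN value only;
-- both Pythons also print the identical failure message (a side effect not modelled here).

-- ===== PORT A =====
-- module helper get_check_lines, shared by both Pythons (transliteration of the module helper)
def get_check_lines (bp : Int) (mode : Int) : List String :=
  let lines : List String := [
      "===== Intel Slim Bootloader STAGE1A =====",
      "===== Intel Slim Bootloader STAGE1B =====",
      "BOOT: BP" ++ PySem.Int.toStr bp,
      "MODE: " ++ PySem.Int.toStr mode,
      "===== Intel Slim Bootloader STAGE2 ======",
      "Jump to payload"]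
  if mode == 0x12 then
    let bp_ab : String := if bp == 0 then "AB" else "BA"
    -- bp_ab[0] / bp_ab[1]: bp_ab always has length 2, so the indexing is in range
    let c0 := ((PySem.Str.pyGet? bp_ab 0).map String.singleton).getD ""
    let c1 := ((PySem.Str.pyGet? bp_ab 1).map String.singleton).getD ""
    lines ++ [
      "===========Read Capsule Image============",
      "Boot from partition " ++ c0 ++ ", update partition " ++ c1,
      "Finished   100%",
      "Reset required to proceed"]
  else
    lines

-- A's inner 'while not found and index < count' scan: first index ≥ index containing line
def pvScanA (line : String) (output : List String) (count : Nat) (index : Nat) : Option Nat :=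
  if _h : index < count then
    if PySem.Str.isIn line (output.getD index "") then some index
    else pvScanA line output count (index + 1)
  else none
termination_by count - index

-- A's 'for line in get_check_lines …' loop: returns (ret, index) after the cycle
def pvInnerA (output : List String) (count : Nat) : List String → Nat → (Int × Nat)
  | [], index => (0, index)
  | line :: rest, index =>
    match pvScanA line output count index with
    | some j => pvInnerA output count rest (j + 1)   -- found: index = j; index += 1; continue
    | none   => (-1, index)                          -- print + ret = -1; break

-- A's outer 'for bp, mode in …' loop (cycle only feeds the printed message)
def pvOuterA (output : List String) (count : Nat) : List (Int × Int) → Nat → Int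
  | [], _index => 0
  | (bp, mode) :: rest, index =>
    let r := pvInnerA output count (get_check_lines bp mode) index
    if r.1 < 0 then r.1 else pvOuterA output count rest r.2

def check_fwu_result (output : List String) : Int :=
  pvOuterA output output.length [(0, 0x12), (1, 0x12), (0, 0)] 0

-- ===== PORT B =====
-- stage 1: the flattened expected table [(line, cycle)] over the three cycles
def pvExpected : List (String × Int) :=
  (PySem.List.enumerate ([((0 : Int), (0x12 : Int)), (1, 0x12), (0, 0)]) 1).flatMap
    (fun p => (get_check_lines p.2.1 p.2.2).map (fun l => (l, p.1)))

-- '[i for i, o in enumerate(output) if line in o]'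
def pvOccList (line : String) (output : List String) : List Int :=
  (PySem.List.enumerate output 0).filterMap
    (fun p => if PySem.Str.isIn line p.2 then some p.1 else none)

-- stage 2: 'for line, _ in expected: if line not in occ: occ[line] = …'
def pvBuildOcc (output : List String) : List (String × Int) → PySem.Dict String (List Int) → PySem.Dict String (List Int)
  | [], occ => occ
  | (line, _) :: rest, occ =>
    pvBuildOcc output rest (if occ.contains line then occ else occ.insert line (pvOccList line output))

-- stage 3: 'nxt = next((i for i in occ[line] if i >= cur), None)' and advance / return -1
-- (occ[line] is always present — built from the same expected table — so getD [] is exact)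
def pvMatchB (occ : PySem.Dict String (List Int)) : List (String × Int) → Int → Int
  | [], _cur => 0
  | (line, _cycle) :: rest, cur =>
    match (occ.getD line []).find? (fun i => decide (cur ≤ i)) with
    | none => -1                                     -- print + return -1
    | some nxt => pvMatchB occ rest (nxt + 1)

def check_fwu_result_alt (output : List String) : Int :=
  pvMatchB (pvBuildOcc output pvExpected PySem.Dict.empty) pvExpected 0

-- ===== PRECONDITION & SPEC =====
def Spec_check_fwu_result (output : List String) (out : Int) : Prop := out = check_fwu_result_alt output
instance (output : List String) (out : Int) : Decidable (Spec_check_fwu_result output out) := by unfold Spec_check_fwu_result; infer_instance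

-- ===== CLAIM (what is proved, stated in full; the proofs are below) =====
def Claim_equal_check_fwu_result : Prop := ∀ (output : List String), Dom_check_fwu_result output → Spec_check_fwu_result output (check_fwu_result output)

-- ===== LEMMAS AND PROOFS =====

-- membership in the occurrence list
theorem pv_mem_occList (line : String) (output : List String) (i : Int) :
    i ∈ pvOccList line output ↔
      ∃ (k : Nat) (h : k < output.length), i = (k : Int) ∧ PySem.Str.isIn line output[k] = true := by
  simp only [pvOccList, List.mem_filterMap, PySem.List.mem_enumerate_iff]
  constructor
  · rintro ⟨p, hpmem, hp⟩
    rcases hpmem with ⟨k, hk, rfl⟩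
    by_cases hin : PySem.Str.isIn line output[k] = true
    · rw [if_pos hin] at hp
      refine ⟨k, hk, ?_, hin⟩
      simpa using hp.symm
    · rw [if_neg hin] at hp; cases hp
  · rintro ⟨k, hk, rfl, hin⟩
    exact ⟨((0 : Int) + (k : Int), output[k]), ⟨k, hk, rfl⟩, by rw [if_pos hin]; simp⟩

-- the occurrence list is strictly increasing
theorem pv_pairwise_occList (line : String) (output : List String) :
    (pvOccList line output).Pairwise (· < ·) := by
  refine List.Pairwise.filterMap _ ?_ (PySem.List.pairwise_lt_enumerate output 0)
  intro p q hpq i hi j hj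
  split at hi
  · split at hj
    · cases hi; cases hj; exact hpq
    · cases hj
  · cases hi

-- find? of the first element ≥ c on a strictly increasing list containing c gives c
theorem pv_find_first_ge {l : List Int} {c : Int} (hs : l.Pairwise (· < ·)) (hmem : c ∈ l) :
    l.find? (fun i => decide (c ≤ i)) = some c := by
  induction l with
  | nil => cases hmem
  | cons a t ih =>
    rcases List.pairwise_cons.mp hs with ⟨ha, ht⟩
    by_cases hca : c ≤ a
    · have : a = c := by
        rcases List.mem_cons.mp hmem with h | h
        · omega
        · have := ha c h; omega
      simp [this]
    · have hmem' : c ∈ t := by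
        rcases List.mem_cons.mp hmem with h | h
        · omega
        · exact h
      simpa [List.find?_cons, hca] using ih ht hmem'
-- if c is absent, 'first ≥ c' and 'first ≥ c+1' agree
theorem pv_find_shift {l : List Int} {c : Int} (hnot : c ∉ l) :
    l.find? (fun i => decide (c ≤ i)) = l.find? (fun i => decide (c + 1 ≤ i)) := by
  induction l with
  | nil => rfl
  | cons a t ih =>
    have hac : a ≠ c := fun h => hnot (h ▸ List.mem_cons_self)
    have ht : c ∉ t := fun h => hnot (List.mem_cons_of_mem _ h)
    by_cases hca : c + 1 ≤ a
    · have h1 : decide (c ≤ a) = true := by simp; omega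
      have h2 : decide (c + 1 ≤ a) = true := by simp; omega
      simp only [List.find?_cons, h1, h2]
    · simp only [List.find?_cons, show decide (c ≤ a) = false by simp; omega,
        show decide (c + 1 ≤ a) = false by simp; omega]
      exact ih ht

-- A's while-scan from index computes B's 'first occurrence ≥ index'
theorem pv_scan_find (line : String) (output : List String) :
    ∀ index : Nat,
      (pvOccList line output).find? (fun i => decide ((index : Int) ≤ i)) =
        Option.map (fun j : Nat => (j : Int)) (pvScanA line output output.length index) := by
  intro index
  by_cases h : index < output.length
  · have hget : output.getD index "" = output[index] := List.getD_eq_getElem output "" h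
    rw [pvScanA]
    simp only [h, dif_pos, hget]
    by_cases hin : PySem.Str.isIn line output[index] = true
    · rw [if_pos hin]
      have hmem : (index : Int) ∈ pvOccList line output :=
        (pv_mem_occList line output _).mpr ⟨index, h, rfl, hin⟩
      simp [pv_find_first_ge (pv_pairwise_occList line output) hmem]
    · rw [if_neg hin]
      have hnot : (index : Int) ∉ pvOccList line output := by
        intro hmem
        rcases (pv_mem_occList line output _).mp hmem with ⟨k, hk, hik, hkin⟩
        have : k = index := by exact_mod_cast hik.symm
        exact hin (this ▸ hkin)
      rw [pv_find_shift hnot]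
      have := pv_scan_find line output (index + 1)
      simpa using this
  · have hsc : pvScanA line output output.length index = none := by rw [pvScanA]; simp [h]
    rw [hsc, Option.map_none, List.find?_eq_none]
    intro i hi
    rcases (pv_mem_occList line output i).mp hi with ⟨k, hk, rfl, _⟩
    simp; omega
termination_by index => output.length - index

-- the built dictionary: every stored value is the occurrence list of its key
def pvOccInv (output : List String) (occ : PySem.Dict String (List Int)) : Prop :=
  ∀ line, occ.get? line = none ∨ occ.get? line = some (pvOccList line output)

theorem pv_build_inv (output : List String) :
    ∀ (pairs : List (String × Int)) (occ : PySem.Dict String (List Int)),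
      pvOccInv output occ → pvOccInv output (pvBuildOcc output pairs occ) := by
  intro pairs
  induction pairs with
  | nil => intro occ h; exact h
  | cons p rest ih =>
    intro occ h
    obtain ⟨line, c⟩ := p
    simp only [pvBuildOcc]
    apply ih
    by_cases hc : occ.contains line = true
    · simp [hc, h]
    · simp only [hc, Bool.false_eq_true, if_false]
      intro l
      rw [PySem.Dict.get?_insert]
      by_cases hl : l = line <;> simp [hl, h l]

theorem pv_build_pres (output : List String) :
    ∀ (pairs : List (String × Int)) (occ : PySem.Dict String (List Int)) (line : String),
      (occ.get? line).isSome → ((pvBuildOcc output pairs occ).get? line).isSome := by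
  intro pairs
  induction pairs with
  | nil => intro occ line h; exact h
  | cons p rest ih =>
    intro occ line h
    obtain ⟨l', c⟩ := p
    simp only [pvBuildOcc]
    apply ih
    by_cases hc : occ.contains l' = true
    · simpa [hc] using h
    · simp only [hc, Bool.false_eq_true, if_false]
      rw [PySem.Dict.get?_insert]
      by_cases hl : line = l' <;> simp [hl, h]

theorem pv_build_mem (output : List String) :
    ∀ (pairs : List (String × Int)) (occ : PySem.Dict String (List Int)) (line : String) (c : Int),
      (line, c) ∈ pairs → ((pvBuildOcc output pairs occ).get? line).isSome := by
  intro pairs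
  induction pairs with
  | nil => intro _ _ _ h; cases h
  | cons p rest ih =>
    intro occ line c h
    obtain ⟨l', c'⟩ := p
    rcases List.mem_cons.mp h with h | h
    · injection h with h1 h2
      subst h1
      simp only [pvBuildOcc]
      apply pv_build_pres
      by_cases hc : occ.contains line = true
      · simp only [hc, if_true]
        rw [PySem.Dict.contains_eq_isSome_get?] at hc; exact hc
      · simp [hc, PySem.Dict.get?_insert_self]
    · simpa only [pvBuildOcc] using ih _ line c h

-- combined lookup fact for the fully built dictionary
theorem pv_build_getD (output : List String) (line : String) (c : Int)
    (h : (line, c) ∈ pvExpected) :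
    ((pvBuildOcc output pvExpected PySem.Dict.empty).getD line []) = pvOccList line output := by
  have hinv := pv_build_inv output pvExpected PySem.Dict.empty (by intro l; simp)
  have hsome := pv_build_mem output pvExpected PySem.Dict.empty line c h
  rcases hinv line with hn | hs
  · rw [hn] at hsome; cases hsome
  · exact PySem.Dict.getD_of_get?_eq_some _ _ hs

-- A's per-cycle loop against B's flat match over that cycle's slice of the table
theorem pv_inner_match (output : List String) (occ : PySem.Dict String (List Int)) :
    ∀ (lines : List String)
      (_hlines : ∀ l ∈ lines, occ.getD l [] = pvOccList l output)
      (cyc : Int) (rest : List (String × Int)) (index : Nat),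
      pvMatchB occ ((lines.map (fun l => (l, cyc))) ++ rest) (index : Int) =
        (if (pvInnerA output output.length lines index).1 = 0 then
          pvMatchB occ rest (((pvInnerA output output.length lines index).2 : Int))
         else -1) := by
  intro lines
  induction lines with
  | nil => intro _ cyc rest index; simp [pvInnerA]
  | cons line tl ih =>
    intro hlines cyc rest index
    have hline := hlines line List.mem_cons_self
    have hfind := pv_scan_find line output index
    simp only [List.map_cons, List.cons_append, pvMatchB, pvInnerA, hline]
    cases hs : pvScanA line output output.length index with
    | none => rw [hs] at hfind; simp [hfind]
    | some j =>
      rw [hs] at hfind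
      simp only [hfind, Option.map_some]
      have hcast : ((j : Int) + 1) = ((j + 1 : Nat) : Int) := by push_cast; ring
      rw [hcast, ih (fun l hl => hlines l (List.mem_cons_of_mem _ hl)) cyc rest (j + 1)]

-- A's inner loop only ever returns ret = 0 or ret = -1
theorem pv_inner_ret (output : List String) (count : Nat) :
    ∀ (lines : List String) (index : Nat),
      (pvInnerA output count lines index).1 = 0 ∨ (pvInnerA output count lines index).1 = -1 := by
  intro lines
  induction lines with
  | nil => intro index; left; rfl
  | cons line tl ih =>
    intro index
    simp only [pvInnerA]
    cases pvScanA line output count index with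
    | none => right; rfl
    | some j => exact ih (j + 1)

-- A's outer loop against B's flat match over the whole (enumerated, flattened) table
theorem pv_outer_match (output : List String) (occ : PySem.Dict String (List Int)) :
    ∀ (cycles : List (Int × Int)) (n : Int) (index : Nat),
      (∀ p ∈ cycles, ∀ l ∈ get_check_lines p.1 p.2, occ.getD l [] = pvOccList l output) →
      pvMatchB occ
          ((PySem.List.enumerate cycles n).flatMap
            (fun p => (get_check_lines p.2.1 p.2.2).map (fun l => (l, p.1)))) (index : Int) =
        pvOuterA output output.length cycles index := by
  intro cycles
  induction cycles with
  | nil => intro n index _; simp [PySem.List.enumerate_nil, pvMatchB, pvOuterA]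
  | cons c rest ih =>
    intro n index hl
    obtain ⟨bp, mode⟩ := c
    rw [PySem.List.enumerate_cons, List.flatMap_cons]
    rw [pv_inner_match output occ (get_check_lines bp mode)
      (fun l hmem => hl (bp, mode) List.mem_cons_self l hmem) n _ index]
    simp only [pvOuterA]
    rcases pv_inner_ret output output.length (get_check_lines bp mode) index with h | h
    · rw [h]
      simp only [show ¬((0 : Int) < 0) from by omega, if_false]
      exact ih (n + 1) _ (fun p hp l hm => hl p (List.mem_cons_of_mem _ hp) l hm)
    · rw [h]
      simp only [show ((-1 : Int) = 0) = False by simp, if_false,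
        show ((-1 : Int) < 0) by omega, if_true]

-- the expected table is the three cycles' line lists, tagged and concatenated
theorem pv_expected_eq :
    pvExpected = ((get_check_lines 0 0x12).map (fun l => (l, (1 : Int)))) ++
      (((get_check_lines 1 0x12).map (fun l => (l, (2 : Int)))) ++
        (((get_check_lines 0 0).map (fun l => (l, (3 : Int)))) ++ [])) := by
  rfl

-- ===== VERDICT (by name: the statement is the Claim_ definition above) =====
theorem check_fwu_result_spec : Claim_equal_check_fwu_result := by
  intro output _
  unfold Spec_check_fwu_result check_fwu_result check_fwu_result_alt
  set occ := pvBuildOcc output pvExpected PySem.Dict.empty with hocc_def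
  have hocc : ∀ p ∈ [((0 : Int), (0x12 : Int)), (1, 0x12), (0, 0)],
      ∀ l ∈ get_check_lines p.1 p.2, occ.getD l [] = pvOccList l output := by
    intro p hp l hl
    simp only [List.mem_cons, List.not_mem_nil, or_false] at hp
    rcases hp with rfl | rfl | rfl
    · refine pv_build_getD output l 1 ?_
      rw [pv_expected_eq]
      exact List.mem_append_left _ (List.mem_map_of_mem hl)
    · refine pv_build_getD output l 2 ?_
      rw [pv_expected_eq]
      exact List.mem_append_right _ (List.mem_append_left _ (List.mem_map_of_mem hl))
    · refine pv_build_getD output l 3 ?_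
      rw [pv_expected_eq]
      exact List.mem_append_right _
        (List.mem_append_right _ (List.mem_append_left _ (List.mem_map_of_mem hl)))
  have key := pv_outer_match output occ [((0 : Int), (0x12 : Int)), (1, 0x12), (0, 0)] 1 0 hocc
  simp only [Nat.cast_zero] at key
  exact key.symm
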